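-- pv_equiv track=rewrite | github.com/estructuras-y-programacion-itba/practica-0-sgonzalezcartey | main.py | poker
-- ===== SOURCE A (Python) =====
-- def poker(lista):
--     poker=False
--     for numero in lista:
--         contador=0
--         for i in range(len(lista)):
--             if numero==lista[i]:
--                 contador+=1
--                 if contador >= 4:
--                     poker=True
--
--     return poker
-- ===== SOURCE B (Python) =====
-- def poker(lista):
--     # One pass with a hash counter and early exit instead of A's nested quadratic scan.
--     counts = {}
--     for x in lista:
--         c = counts.get(x, 0) + 1
--         if c >= 4:
--             return True
--         counts[x] = c
--     return False
-- ===== Notes on version B (the rewrite author's own statement) =====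
-- stated objective: faster
-- what changed: Replaced the nested full-list rescan per element by a single pass that maintains a hash-map counter and returns True the moment any value's count reaches 4.
import Mathlib
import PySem

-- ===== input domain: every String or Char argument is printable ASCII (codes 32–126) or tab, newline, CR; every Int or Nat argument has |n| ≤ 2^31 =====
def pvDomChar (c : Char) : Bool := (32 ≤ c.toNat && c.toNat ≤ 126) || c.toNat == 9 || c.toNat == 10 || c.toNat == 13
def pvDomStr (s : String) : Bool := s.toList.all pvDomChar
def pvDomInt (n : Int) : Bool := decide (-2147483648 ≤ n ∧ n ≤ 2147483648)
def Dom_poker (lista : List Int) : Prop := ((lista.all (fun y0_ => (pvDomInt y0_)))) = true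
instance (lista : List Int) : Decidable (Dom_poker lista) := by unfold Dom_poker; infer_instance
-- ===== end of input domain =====

-- B replaces A's nested full-list rescan per element by a single pass with a hash-map
-- counter and an early exit (objective: faster, O(n) vs O(n^2)).

-- ===== PORT A =====
-- inner loop state: (contador, poker); lista[i] with i ∈ range(len(lista)) is always
-- in range, so pyGetD with default 0 is exact here.
def poker (lista : List Int) : Bool :=
  lista.foldl
    (fun p numero =>
      ((PySem.List.pyRange 0 lista.length 1).foldl
        (fun (st : Int × Bool) i =>
          if numero = PySem.List.pyGetD lista i 0 then
            let c := st.1 + 1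
            (c, if 4 ≤ c then true else st.2)
          else st)
        (0, p)).2)
    false

-- ===== PORT B =====
def pokerGo (d : PySem.Dict Int Int) : List Int → Bool
  | [] => false
  | x :: xs =>
    let c := d.getD x 0 + 1
    if 4 ≤ c then true else pokerGo (d.insert x c) xs

def poker_alt (lista : List Int) : Bool :=
  pokerGo PySem.Dict.empty lista

-- ===== PRECONDITION & SPEC =====
def Spec_poker (lista : List Int) (out : Bool) : Prop := out = poker_alt lista
instance (lista : List Int) (out : Bool) : Decidable (Spec_poker lista out) := by unfold Spec_poker; infer_instance

-- ===== CLAIM (what is proved, stated in full; the proofs are below) =====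
def Claim_equal_poker : Prop := ∀ (lista : List Int), Dom_poker lista → Spec_poker lista (poker lista)

-- ===== LEMMAS AND PROOFS =====

-- A's inner loop over indices is a fold over the list itself
theorem poker_inner_fold (lista : List Int) (numero : Int) (p : Bool) :
    ((PySem.List.pyRange 0 lista.length 1).foldl
        (fun (st : Int × Bool) i =>
          if numero = PySem.List.pyGetD lista i 0 then
            let c := st.1 + 1
            (c, if 4 ≤ c then true else st.2)
          else st)
        (0, p))
    = lista.foldl
        (fun (st : Int × Bool) v =>
          if numero = v then
            let c := st.1 + 1
            (c, if 4 ≤ c then true else st.2)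
          else st)
        (0, p) := by
  exact PySem.List.foldl_pyRange_zero_pyGetD' lista 0
    (fun (st : Int × Bool) v => if numero = v then
        let c := st.1 + 1
        (c, if 4 ≤ c then true else st.2)
      else st) ((0 : Int), p)

-- A's inner loop flag in terms of the count of numero
theorem poker_inner_flag (numero : Int) (L : List Int) (c : Int) (p : Bool) :
    (L.foldl
        (fun (st : Int × Bool) v =>
          if numero = v then
            let c := st.1 + 1
            (c, if 4 ≤ c then true else st.2)
          else st)
        (c, p)).2
    = (p || decide (4 ≤ c + (L.count numero : Int) ∧ 0 < L.count numero)) := by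
  induction L generalizing c p with
  | nil => simp
  | cons v L ih =>
    simp only [List.foldl_cons]
    by_cases h : numero = v
    · subst h
      simp only [if_pos rfl]
      rw [ih]
      by_cases h4 : (4 : Int) ≤ c + 1
      · simp only [if_pos h4, List.count_cons_self, Bool.true_or]
        have hcnt : (0 : Int) ≤ (L.count numero : Int) := Int.natCast_nonneg _
        have hp : (4 ≤ c + (↑(L.count numero) + 1) ∧ 0 < L.count numero + 1) := by
          constructor
          · push_cast; omega
          · omega
        simp [hp]
      · simp only [if_neg h4, List.count_cons_self]
        congr 1
        simp only [decide_eq_decide]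
        push_cast
        omega
    · simp only [if_neg h]
      rw [List.count_cons_of_ne (Ne.symm h)]
      exact ih c p

-- folding || over a list is List.any
theorem foldl_or_any (g : Int → Bool) (L : List Int) (p : Bool) :
    L.foldl (fun acc x => acc || g x) p = (p || L.any g) := by
  induction L generalizing p with
  | nil => simp
  | cons x L ih => simp [List.foldl_cons, ih, Bool.or_assoc]

-- fold congruence on members
theorem foldl_ext_mem {α β : Type} (f g : β → α → β) (b : β) (L : List α)
    (H : ∀ acc x, x ∈ L → f acc x = g acc x) : L.foldl f b = L.foldl g b := by
  induction L generalizing b with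
  | nil => rfl
  | cons x L ih =>
    simp only [List.foldl_cons]
    rw [H b x List.mem_cons_self]
    exact ih _ (fun acc y hy => H acc y (List.mem_cons_of_mem _ hy))

-- A is: some element of lista occurs at least 4 times
theorem poker_eq_any (lista : List Int) :
    poker lista = lista.any (fun x => decide (4 ≤ lista.count x)) := by
  unfold poker
  rw [foldl_ext_mem _ (fun p numero => p || decide (4 ≤ lista.count numero)) false lista ?_]
  · rw [foldl_or_any]; simp
  · intro p numero _
    rw [poker_inner_fold, poker_inner_flag]
    congr 1
    simp only [decide_eq_decide]
    constructor
    · intro h; omega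
    · intro h
      constructor
      · push_cast; omega
      · omega

-- B's loop: true iff some pending element's stored count plus remaining occurrences reaches 4
theorem pokerGo_iff (L : List Int) (d : PySem.Dict Int Int)
    (hb : ∀ x, d.getD x 0 ≤ 3) :
    (pokerGo d L = true ↔ ∃ x ∈ L, 4 ≤ d.getD x 0 + (L.count x : Int)) := by
  induction L generalizing d with
  | nil => simp [pokerGo]
  | cons x xs ih =>
    simp only [pokerGo]
    by_cases h4 : (4 : Int) ≤ d.getD x 0 + 1
    · simp only [if_pos h4, true_iff]
      refine ⟨x, List.mem_cons_self, ?_⟩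
      rw [List.count_cons_self]
      push_cast
      omega
    · simp only [if_neg h4]
      have hb' : ∀ y, (d.insert x (d.getD x 0 + 1)).getD y 0 ≤ 3 := by
        intro y
        rw [PySem.Dict.getD_insert]
        split_ifs with hy
        · omega
        · exact hb y
      rw [ih _ hb']
      constructor
      · rintro ⟨y, hy, hle⟩
        refine ⟨y, List.mem_cons_of_mem _ hy, ?_⟩
        rw [PySem.Dict.getD_insert] at hle
        by_cases hyx : y = x
        · subst hyx
          rw [if_pos rfl] at hle
          rw [List.count_cons_self]
          push_cast at hle ⊢
          omega
        · rw [if_neg hyx] at hle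
          rw [List.count_cons_of_ne (Ne.symm hyx)]
          exact hle
      · rintro ⟨y, hy, hle⟩
        by_cases hyx : y = x
        · subst hyx
          rw [List.count_cons_self] at hle
          have hxs : 0 < xs.count y := by
            by_contra hc
            have h0 : xs.count y = 0 := by omega
            rw [h0] at hle
            push_cast at hle
            omega
          refine ⟨y, List.count_pos_iff.mp hxs, ?_⟩
          rw [PySem.Dict.getD_insert, if_pos rfl]
          push_cast at hle ⊢
          omega
        · have hy' : y ∈ xs := by
            rcases List.mem_cons.mp hy with h | h
            · exact absurd h hyx
            · exact h
          refine ⟨y, hy', ?_⟩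
          rw [PySem.Dict.getD_insert, if_neg hyx]
          rw [List.count_cons_of_ne (Ne.symm hyx)] at hle
          exact hle

theorem poker_alt_iff (lista : List Int) :
    (poker_alt lista = true ↔ ∃ x ∈ lista, 4 ≤ lista.count x) := by
  unfold poker_alt
  rw [pokerGo_iff _ _ (by intro x; rw [PySem.Dict.getD_empty]; omega)]
  constructor <;> rintro ⟨x, hx, h⟩ <;> refine ⟨x, hx, ?_⟩
  · rw [PySem.Dict.getD_empty] at h
    omega
  · rw [PySem.Dict.getD_empty]
    omega

-- ===== VERDICT (by name: the statement is the Claim_ definition above) =====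
theorem poker_spec : Claim_equal_poker := by
  intro lista _
  unfold Spec_poker
  rw [poker_eq_any]
  have h : (lista.any (fun x => decide (4 ≤ lista.count x)) = true) ↔ (poker_alt lista = true) := by
    rw [List.any_eq_true, poker_alt_iff lista]
    simp
  cases ha : lista.any (fun x => decide (4 ≤ lista.count x)) <;>
    cases hbb : poker_alt lista <;> simp_all
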